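-- pv_equiv track=rewrite | github.com/alkostenko/spline-interpolation | lab_2.py | sort_xy
-- ===== SOURCE A (Python) =====
-- import collections
--
-- def sort_xy(x,y):
--     dictionary={}
--     n=len(x)
--     for key in x:
--         for value in y:
--             dictionary[key]=value
--             y.remove(value)
--             break
--     x.clear()
--     y.clear()
--     odictionary=collections.OrderedDict(sorted(dictionary.items()))
--     for k,v in odictionary.items():
--         x.append(k)
--         y.append(v)
--     res=[]
--     res.append(x)
--     res.append(y)
--     return res
-- ===== SOURCE B (Python) =====
-- def sort_xy(x, y):
--     pairs = sorted(zip(x, y), key=lambda p: p[0])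
--     kept = [p for p, nxt in zip(pairs, pairs[1:]) if p[0] != nxt[0]]
--     if pairs:
--         kept.append(pairs[-1])
--     x[:] = [k for k, _ in kept]
--     y[:] = [v for _, v in kept]
--     return [x, y]
-- ===== Notes on version B (the rewrite author's own statement) =====
-- stated objective: faster
-- what changed: Replaces the hash-dict dedup (built with a quadratic remove-head loop over y) followed by a sort of the dict items with a single stable sort of zip(x,y) by key plus one adjacent pass keeping the last pair of each equal-key run.
import Mathlib
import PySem

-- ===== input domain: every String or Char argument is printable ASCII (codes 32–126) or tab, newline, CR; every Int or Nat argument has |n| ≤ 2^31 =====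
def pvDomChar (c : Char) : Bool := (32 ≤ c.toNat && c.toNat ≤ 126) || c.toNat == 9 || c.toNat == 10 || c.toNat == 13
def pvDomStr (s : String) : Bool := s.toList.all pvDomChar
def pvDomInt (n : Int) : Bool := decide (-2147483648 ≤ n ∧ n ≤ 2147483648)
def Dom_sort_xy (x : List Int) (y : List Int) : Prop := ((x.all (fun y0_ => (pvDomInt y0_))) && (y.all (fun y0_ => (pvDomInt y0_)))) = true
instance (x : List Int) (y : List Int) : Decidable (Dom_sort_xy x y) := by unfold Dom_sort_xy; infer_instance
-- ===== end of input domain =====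

-- B replaces A's hash-dict dedup (with its quadratic remove-head loop) by one stable sort of
-- zip(x,y) plus an adjacent last-of-run pass; both A and B mutate x and y in place to the same
-- final contents (the theorems here are about the returned value).

-- ===== PORT A =====
-- A pairs each key of x with the current head of y (y.remove(y[0])), last write wins in the dict,
-- then sorts the items (Python tuple order = lexicographic, hence the toLex key) and rebuilds x, y.
def sort_xy (x : List Int) (y : List Int) : List (List Int) :=
  let st := x.foldl (fun (st : PySem.Dict Int Int × List Int) key =>
      match st.2 with
      | [] => st
      | v :: rest => (st.1.insert key v, rest)) (PySem.Dict.empty, y)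
  let items := PySem.List.sorted st.1.items (fun p => (toLex p : Lex (Int × Int))) false
  let xy := items.foldl (fun (acc : List Int × List Int) p => (acc.1 ++ [p.1], acc.2 ++ [p.2])) ([], [])
  [xy.1, xy.2]

-- ===== PORT B =====
def sort_xy_alt (x : List Int) (y : List Int) : List (List Int) :=
  let pairs := PySem.List.sorted (x.zip y) (fun p => p.1) false
  let kept := ((pairs.zip (PySem.List.slice pairs (some 1) none)).filter
      (fun pq => pq.1.1 != pq.2.1)).map (·.1)
  let kept := match pairs.getLast? with
    | some p => kept ++ [p]      -- if pairs: kept.append(pairs[-1])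
    | none => kept
  [kept.map (·.1), kept.map (·.2)]

-- ===== PRECONDITION & SPEC =====
def Spec_sort_xy (x : List Int) (y : List Int) (out : List (List Int)) : Prop := out = sort_xy_alt x y
instance (x : List Int) (y : List Int) (out : List (List Int)) : Decidable (Spec_sort_xy x y out) := by unfold Spec_sort_xy; infer_instance

-- ===== CLAIM (what is proved, stated in full; the proofs are below) =====
def Claim_equal_sort_xy : Prop := ∀ (x : List Int) (y : List Int), Dom_sort_xy x y → Spec_sort_xy x y (sort_xy x y)

-- ===== LEMMAS AND PROOFS =====

def lastP (l : List (Int × Int)) (k : Int) : Option (Int × Int) :=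
  l.reverse.find? (fun q => q.1 == k)

lemma foldA_nil (x : List Int) (d : PySem.Dict Int Int) :
    x.foldl (fun (st : PySem.Dict Int Int × List Int) key =>
      match st.2 with
      | [] => st
      | v :: rest => (st.1.insert key v, rest)) (d, []) = (d, []) := by
  induction x with
  | nil => rfl
  | cons a t ih => simp only [List.foldl_cons]; exact ih

lemma foldA_zip (x y : List Int) (d : PySem.Dict Int Int) :
    (x.foldl (fun (st : PySem.Dict Int Int × List Int) key =>
      match st.2 with
      | [] => st
      | v :: rest => (st.1.insert key v, rest)) (d, y)).1
    = (x.zip y).foldl (fun d p => d.insert p.1 p.2) d := by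
  induction x generalizing y d with
  | nil => rfl
  | cons a t ih =>
    cases y with
    | nil => simp [foldA_nil]
    | cons v ys => simpa using ih ys (d.insert a v)

lemma lastP_append_singleton (l : List (Int × Int)) (q : Int × Int) (k : Int) :
    lastP (l ++ [q]) k = if q.1 = k then some q else lastP l k := by
  simp only [lastP, List.reverse_append, List.reverse_cons, List.reverse_nil,
    List.nil_append, List.cons_append, List.find?_cons]
  by_cases h : q.1 = k
  · simp [h]
  · have hb : (q.1 == k) = false := by simpa using h
    simp [hb, h]

lemma mem_items_foldl_insert (pairs : List (Int × Int)) (p : Int × Int) :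
    p ∈ (pairs.foldl (fun (d : PySem.Dict Int Int) q => d.insert q.1 q.2) PySem.Dict.empty).items
    ↔ lastP pairs p.1 = some p := by
  induction pairs using List.reverseRecOn with
  | nil => simp [lastP, PySem.Dict.empty]
  | append_singleton l q ih =>
    rw [List.foldl_append]
    simp only [List.foldl_cons, List.foldl_nil, PySem.Dict.mem_items_insert,
      lastP_append_singleton]
    constructor
    · rintro (rfl | ⟨hm, hne⟩)
      · simp
      · rw [if_neg (by intro h; exact hne h.symm)]; exact ih.mp hm
    · intro h
      by_cases hq : q.1 = p.1
      · left; rw [if_pos hq] at h; exact (Option.some.inj h).symm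
      · right; rw [if_neg hq] at h; exact ⟨ih.mpr h, fun hc => hq hc.symm⟩

lemma lastP_eq_filter_getLast? (l : List (Int × Int)) (k : Int) :
    lastP l k = (l.filter (fun q => q.1 == k)).getLast? := by
  induction l using List.reverseRecOn with
  | nil => rfl
  | append_singleton t q ih =>
    rw [lastP_append_singleton, List.filter_append]
    by_cases h : q.1 = k <;> simp [h, ih]

def dedupLast : List (Int × Int) → List (Int × Int)
  | [] => []
  | [p] => [p]
  | p :: q :: t => if p.1 = q.1 then dedupLast (q :: t) else p :: dedupLast (q :: t)

lemma lastP_cons (p : Int × Int) (l : List (Int × Int)) (k : Int) :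
    lastP (p :: l) k = match lastP l k with
      | some r => some r
      | none => if p.1 = k then some p else none := by
  simp only [lastP, List.reverse_cons, List.find?_append]
  cases List.find? (fun q => q.1 == k) l.reverse with
  | none => by_cases h : p.1 = k <;> simp [h]
  | some r => simp

lemma lastP_eq_none_iff (l : List (Int × Int)) (k : Int) :
    lastP l k = none ↔ k ∉ l.map Prod.fst := by
  rw [lastP, List.find?_eq_none]
  constructor
  · intro h hm
    rcases List.mem_map.mp hm with ⟨r, hr, he⟩
    exact absurd (by simpa using he) (by simpa using h r (List.mem_reverse.mpr hr))
  · intro h r hr he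
    exact h (List.mem_map.mpr ⟨r, List.mem_reverse.mp hr, by simpa using he⟩)

lemma mem_dedupLast_sub (S : List (Int × Int)) (p : Int × Int) (h : p ∈ dedupLast S) : p ∈ S := by
  induction S with
  | nil => exact absurd h (by simp [dedupLast])
  | cons a t ih =>
    cases t with
    | nil => simpa [dedupLast] using h
    | cons b u =>
      rw [dedupLast] at h
      split_ifs at h with hk
      · exact List.mem_cons_of_mem _ (ih h)
      · rcases List.mem_cons.mp h with rfl | h'
        · exact List.mem_cons_self
        · exact List.mem_cons_of_mem _ (ih h')

lemma lastP_cons_of_mem (a : Int × Int) (l : List (Int × Int)) (k : Int)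
    (h : k ∈ l.map Prod.fst) : lastP (a :: l) k = lastP l k := by
  rw [lastP_cons]
  cases hf : lastP l k with
  | some r => rfl
  | none => exact absurd ((lastP_eq_none_iff _ _).mp hf) (by simpa using h)

lemma lastP_cons_of_not_mem (a : Int × Int) (l : List (Int × Int)) (k : Int)
    (h : k ∉ l.map Prod.fst) : lastP (a :: l) k = if a.1 = k then some a else none := by
  rw [lastP_cons, (lastP_eq_none_iff _ _).mpr h]

lemma mem_dedupLast_iff (S : List (Int × Int)) (hS : S.Pairwise (fun a b => a.1 ≤ b.1)) (p : Int × Int) :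
    p ∈ dedupLast S ↔ lastP S p.1 = some p := by
  induction S with
  | nil => simp [dedupLast, lastP]
  | cons a t ih =>
    cases t with
    | nil =>
      rw [show dedupLast [a] = [a] from rfl,
        lastP_cons_of_not_mem a [] p.1 (by simp)]
      constructor
      · intro h
        rw [List.mem_singleton] at h
        subst h; simp
      · intro h
        by_cases hk : a.1 = p.1
        · rw [if_pos hk] at h
          simpa using (Option.some.inj h).symm
        · rw [if_neg hk] at h
          exact absurd h (by simp)
    | cons b u =>
      have hcons := List.pairwise_cons.mp hS
      have hS' : (b :: u).Pairwise (fun a b => a.1 ≤ b.1) := hcons.2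
      have hab : a.1 ≤ b.1 := hcons.1 b List.mem_cons_self
      have hkeys : ∀ r ∈ b :: u, b.1 ≤ r.1 := by
        intro r hr
        rcases List.mem_cons.mp hr with rfl | hru
        · exact le_refl _
        · exact (List.pairwise_cons.mp hS').1 r hru
      rw [dedupLast]
      split_ifs with hk
      · -- equal keys: the head a is irrelevant on both sides
        have heq : lastP (a :: b :: u) p.1 = lastP (b :: u) p.1 := by
          by_cases hm : p.1 ∈ (b :: u).map Prod.fst
          · exact lastP_cons_of_mem _ _ _ hm
          · have hbp : ¬ a.1 = p.1 := by
              intro he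
              exact hm (by simp [← he, hk])
            rw [lastP_cons_of_not_mem _ _ _ hm, if_neg hbp,
              (lastP_eq_none_iff _ _).mpr hm]
        rw [heq]; exact ih hS'
      · have halt : a.1 < b.1 := lt_of_le_of_ne hab hk
        have hnot : a.1 ∉ (b :: u).map Prod.fst := by
          intro hm
          rcases List.mem_map.mp hm with ⟨r, hr, he⟩
          have := hkeys r hr
          omega
        rw [List.mem_cons, ih hS']
        by_cases hap : p.1 = a.1
        · have hnm : p.1 ∉ (b :: u).map Prod.fst := by rwa [hap]
          rw [lastP_cons_of_not_mem _ _ _ hnm, if_pos hap.symm,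
            (lastP_eq_none_iff _ _).mpr hnm]
          constructor
          · rintro (rfl | hmem)
            · rfl
            · exact absurd hmem (by simp)
          · intro h
            exact Or.inl (Option.some.inj h).symm
        · by_cases hm : p.1 ∈ (b :: u).map Prod.fst
          · rw [lastP_cons_of_mem _ _ _ hm]
            constructor
            · rintro (rfl | hmem)
              · exact absurd rfl hap
              · exact hmem
            · intro h; exact Or.inr h
          · rw [lastP_cons_of_not_mem _ _ _ hm, if_neg (fun he => hap he.symm),
              (lastP_eq_none_iff _ _).mpr hm]
            constructor
            · rintro (rfl | hmem)
              · exact absurd rfl hap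
              · exact absurd hmem (by simp)
            · intro h; exact absurd h (by simp)

lemma dedupLast_pairwise (S : List (Int × Int)) (hS : S.Pairwise (fun a b => a.1 ≤ b.1)) :
    (dedupLast S).Pairwise (fun a b => a.1 < b.1) := by
  induction S with
  | nil => simp [dedupLast]
  | cons a t ih =>
    cases t with
    | nil => simp [dedupLast]
    | cons b u =>
      have hcons := List.pairwise_cons.mp hS
      have hS' : (b :: u).Pairwise (fun a b => a.1 ≤ b.1) := hcons.2
      have hab : a.1 ≤ b.1 := hcons.1 b List.mem_cons_self
      have hkeys : ∀ r ∈ b :: u, b.1 ≤ r.1 := by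
        intro r hr
        rcases List.mem_cons.mp hr with rfl | hru
        · exact le_refl _
        · exact (List.pairwise_cons.mp hS').1 r hru
      rw [dedupLast]
      split_ifs with hk
      · exact ih hS'
      · have halt : a.1 < b.1 := lt_of_le_of_ne hab hk
        refine List.pairwise_cons.mpr ⟨?_, ih hS'⟩
        intro r hr
        have := mem_dedupLast_sub _ _ hr
        have := hkeys r this
        omega

lemma kept_eq_dedupLast (S : List (Int × Int)) :
    (match S.getLast? with
      | some p => ((S.zip (PySem.List.slice S (some 1) none)).filter
          (fun pq => pq.1.1 != pq.2.1)).map (·.1) ++ [p]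
      | none => ((S.zip (PySem.List.slice S (some 1) none)).filter
          (fun pq => pq.1.1 != pq.2.1)).map (·.1)) = dedupLast S := by
  rw [PySem.List.slice_from_one]
  induction S with
  | nil => rfl
  | cons a t ih =>
    cases t with
    | nil => rfl
    | cons b u =>
      rw [show (a :: b :: u).tail = b :: u from rfl] at *
      rw [show (a :: b :: u).zip (b :: u) = (a, b) :: ((b :: u).zip u) from rfl]
      rw [show (b :: u).tail = u from rfl] at ih
      rw [List.filter_cons, dedupLast, List.getLast?_cons_cons]
      cases hg : (b :: u).getLast? with
      | none => simp [List.getLast?_eq_none_iff] at hg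
      | some p =>
        rw [hg] at ih
        by_cases hk : a.1 = b.1
        · have hbf : ((a, b).1.1 != (a, b).2.1) = false := by simpa using hk
          rw [hbf, if_pos hk]
          simpa using ih
        · have hbt : ((a, b).1.1 != (a, b).2.1) = true := by simpa using hk
          rw [hbt, if_neg hk]
          simpa using ih

lemma filter_insertBy_of_ne (bf : Int × Int → Int × Int → Bool) (x : Int × Int)
    (ys : List (Int × Int)) (k : Int) (hx : ¬ x.1 = k) :
    (PySem.List.insertBy bf x ys).filter (fun q => q.1 == k)
      = ys.filter (fun q => q.1 == k) := by
  induction ys with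
  | nil => simp [PySem.List.insertBy, hx]
  | cons y t ih =>
    rw [PySem.List.insertBy]
    split_ifs with hb
    · rw [List.filter_cons]
      simp [hx]
    · rw [List.filter_cons, List.filter_cons, ih]

lemma filter_insertBy_of_eq (x : Int × Int) (ys : List (Int × Int)) (k : Int)
    (hx : x.1 = k) (hys : ys.Pairwise (fun a b => a.1 ≤ b.1)) :
    (PySem.List.insertBy (fun a b => decide (a.1 < b.1)) x ys).filter (fun q => q.1 == k)
      = ys.filter (fun q => q.1 == k) ++ [x] := by
  induction ys with
  | nil => simp [PySem.List.insertBy, hx]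
  | cons y t ih =>
    have hcons := List.pairwise_cons.mp hys
    rw [PySem.List.insertBy]
    split_ifs with hb
    · have hxy : x.1 < y.1 := by simpa using hb
      have hnone : (y :: t).filter (fun q => q.1 == k) = [] := by
        rw [List.filter_eq_nil_iff]
        intro r hr
        have : y.1 ≤ r.1 := by
          rcases List.mem_cons.mp hr with rfl | h
          · exact le_refl _
          · exact hcons.1 r h
        simp only [beq_iff_eq]
        omega
      rw [List.filter_cons_of_pos (by simpa using hx), hnone]
      rfl
    · rw [List.filter_cons, List.filter_cons, ih hcons.2]
      split <;> simp

lemma sorted_append_singleton (l : List (Int × Int)) (x : Int × Int) :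
    PySem.List.sorted (l ++ [x]) (fun p => p.1) false
      = PySem.List.insertBy (fun a b => decide (a.1 < b.1)) x
          (PySem.List.sorted l (fun p => p.1) false) := by
  rw [PySem.List.sorted_eq_foldl_insertBy, PySem.List.sorted_eq_foldl_insertBy,
    List.foldl_append, List.foldl_cons, List.foldl_nil]

lemma sorted_filter_key (l : List (Int × Int)) (k : Int) :
    (PySem.List.sorted l (fun p => p.1) false).filter (fun q => q.1 == k)
      = l.filter (fun q => q.1 == k) := by
  induction l using List.reverseRecOn with
  | nil => rfl
  | append_singleton t x ih =>
    rw [sorted_append_singleton, List.filter_append]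
    by_cases hx : x.1 = k
    · rw [filter_insertBy_of_eq x _ k hx (PySem.List.sorted_pairwise t _), ih]
      simp [hx]
    · rw [filter_insertBy_of_ne _ x _ k hx, ih]
      simp [hx]


lemma ports_eq (x y : List Int) :
    (let st := x.foldl (fun (st : PySem.Dict Int Int × List Int) key =>
        match st.2 with
        | [] => st
        | v :: rest => (st.1.insert key v, rest)) (PySem.Dict.empty, y)
     let items := PySem.List.sorted st.1.items (fun p => (toLex p : Lex (Int × Int))) false
     let xy := items.foldl (fun (acc : List Int × List Int) p => (acc.1 ++ [p.1], acc.2 ++ [p.2])) ([], [])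
     [xy.1, xy.2])
    = (let pairs := PySem.List.sorted (x.zip y) (fun p => p.1) false
       let kept := ((pairs.zip (PySem.List.slice pairs (some 1) none)).filter
          (fun pq => pq.1.1 != pq.2.1)).map (·.1)
       let kept := match pairs.getLast? with
        | some p => kept ++ [p]
        | none => kept
       [kept.map (·.1), kept.map (·.2)]) := by
  simp only []
  rw [foldA_zip, kept_eq_dedupLast]
  set pairs := x.zip y with hp
  set S := PySem.List.sorted pairs (fun p => p.1) false with hSdef
  set d := pairs.foldl (fun d p => d.insert p.1 p.2) PySem.Dict.empty with hd
  have hSpair : S.Pairwise (fun a b => a.1 ≤ b.1) := PySem.List.sorted_pairwise pairs _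
  have hlast : ∀ k, lastP S k = lastP pairs k := by
    intro k
    rw [lastP_eq_filter_getLast?, lastP_eq_filter_getLast?, hSdef, sorted_filter_key]
  have hnodK : d.keys.Nodup :=
    PySem.Dict.nodup_keys_foldl_insert_key pairs Prod.fst (fun d p => p.2) _
      PySem.Dict.nodup_keys_empty
  have hnodA : d.items.Nodup := List.Nodup.of_map Prod.fst hnodK
  have hdedup_pw := dedupLast_pairwise S hSpair
  have hnodB : (dedupLast S).Nodup :=
    hdedup_pw.imp (fun h he => by subst he; exact lt_irrefl _ h)
  have hmem : ∀ p, p ∈ dedupLast S ↔ p ∈ d.items := by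
    intro p
    rw [mem_dedupLast_iff S hSpair, hlast, hd, mem_items_foldl_insert]
  have hperm : (dedupLast S).Perm d.items := (List.perm_ext_iff_of_nodup hnodB hnodA).mpr hmem
  have hlex : (dedupLast S).Pairwise
      (fun a b => (toLex a : Lex (Int × Int)) < toLex b) :=
    hdedup_pw.imp (fun h => Prod.Lex.toLex_lt_toLex.mpr (Or.inl h))
  have hsorted : PySem.List.sorted d.items (fun p => (toLex p : Lex (Int × Int))) false
      = dedupLast S :=
    PySem.List.sorted_eq_of_perm_of_pairwise_lt _ _ _ hperm hlex
  rw [hsorted]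
  rw [PySem.List.foldl_prod_mk (f := fun s (e : Int × Int) => s ++ [e.1])
    (g := fun s (e : Int × Int) => s ++ [e.2])]
  rw [PySem.List.foldl_append_singleton_eq_map, PySem.List.foldl_append_singleton_eq_map]
  simp

-- ===== VERDICT (by name: the statement is the Claim_ definition above) =====
theorem sort_xy_spec : Claim_equal_sort_xy := by
  intro x y _
  unfold Spec_sort_xy sort_xy sort_xy_alt
  exact ports_eq x y
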